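-- pv_equiv track=rewrite | github.com/Tranquil666/WEATHER-APP | app.py | get_weather_background
-- ===== SOURCE A (Python) =====
-- def get_weather_background(condition):
--     """Get background gradient based on weather condition"""
--     condition_lower = condition.lower()
--
--     if any(word in condition_lower for word in ['sunny', 'clear', 'bright']):
--         return "linear-gradient(135deg, #74b9ff 0%, #0984e3 50%, #fdcb6e 100%)"
--     elif any(word in condition_lower for word in ['rain', 'shower', 'drizzle']):
--         return "linear-gradient(135deg, #636e72 0%, #2d3436 50%, #74b9ff 100%)"
--     elif any(word in condition_lower for word in ['cloud', 'overcast']):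
--         return "linear-gradient(135deg, #ddd 0%, #74b9ff 50%, #636e72 100%)"
--     elif any(word in condition_lower for word in ['snow', 'blizzard']):
--         return "linear-gradient(135deg, #ffffff 0%, #ddd 50%, #74b9ff 100%)"
--     elif any(word in condition_lower for word in ['storm', 'thunder']):
--         return "linear-gradient(135deg, #2d3436 0%, #636e72 50%, #74b9ff 100%)"
--     elif any(word in condition_lower for word in ['fog', 'mist', 'haze']):
--         return "linear-gradient(135deg, #b2bec3 0%, #ddd 50%, #74b9ff 100%)"
--     else:
--         return "linear-gradient(135deg, #74b9ff 0%, #0984e3 100%)"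
-- ===== SOURCE B (Python) =====
-- _KEYWORD_CATEGORY = {
--     'sunny': 0, 'clear': 0, 'bright': 0,
--     'rain': 1, 'shower': 1, 'drizzle': 1,
--     'cloud': 2, 'overcast': 2,
--     'snow': 3, 'blizzard': 3,
--     'storm': 4, 'thunder': 4,
--     'fog': 5, 'mist': 5, 'haze': 5,
-- }
--
-- _GRADIENTS = [
--     "linear-gradient(135deg, #74b9ff 0%, #0984e3 50%, #fdcb6e 100%)",
--     "linear-gradient(135deg, #636e72 0%, #2d3436 50%, #74b9ff 100%)",
--     "linear-gradient(135deg, #ddd 0%, #74b9ff 50%, #636e72 100%)",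
--     "linear-gradient(135deg, #ffffff 0%, #ddd 50%, #74b9ff 100%)",
--     "linear-gradient(135deg, #2d3436 0%, #636e72 50%, #74b9ff 100%)",
--     "linear-gradient(135deg, #b2bec3 0%, #ddd 50%, #74b9ff 100%)",
--     "linear-gradient(135deg, #74b9ff 0%, #0984e3 100%)",
-- ]
--
--
-- def get_weather_background(condition):
--     """Get background gradient based on weather condition"""
--     s = condition.lower()
--     best = min((cat for kw, cat in _KEYWORD_CATEGORY.items() if kw in s),
--                default=len(_GRADIENTS) - 1)
--     return _GRADIENTS[best]
-- ===== Notes on version B (the rewrite author's own statement) =====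
-- stated objective: idiomatic
-- what changed: Replaces the ordered if/elif short-circuit ladder with a keyword-to-category map: B collects every matching category in one comprehension and picks the gradient by numeric minimum instead of by branch order.
import Mathlib
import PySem

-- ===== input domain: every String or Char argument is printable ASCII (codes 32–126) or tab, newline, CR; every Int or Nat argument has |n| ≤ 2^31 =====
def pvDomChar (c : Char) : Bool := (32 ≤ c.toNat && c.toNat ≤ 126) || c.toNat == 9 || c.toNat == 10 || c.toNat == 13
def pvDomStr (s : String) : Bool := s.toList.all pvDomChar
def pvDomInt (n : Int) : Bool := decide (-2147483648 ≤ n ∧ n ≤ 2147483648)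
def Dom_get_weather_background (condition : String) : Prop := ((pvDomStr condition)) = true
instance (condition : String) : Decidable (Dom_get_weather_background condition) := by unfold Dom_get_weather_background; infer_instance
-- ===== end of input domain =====

-- B replaces A's ordered if/elif short-circuit ladder by a keyword→category map: it collects
-- every matching category and selects the gradient by numeric minimum (idiomatic, same cost).

-- ===== PORT A =====
def get_weather_background (condition : String) : String :=
  let condition_lower := PySem.Str.lower condition
  if (["sunny", "clear", "bright"].any (fun word => PySem.Str.isIn word condition_lower)) then
    "linear-gradient(135deg, #74b9ff 0%, #0984e3 50%, #fdcb6e 100%)"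
  else if (["rain", "shower", "drizzle"].any (fun word => PySem.Str.isIn word condition_lower)) then
    "linear-gradient(135deg, #636e72 0%, #2d3436 50%, #74b9ff 100%)"
  else if (["cloud", "overcast"].any (fun word => PySem.Str.isIn word condition_lower)) then
    "linear-gradient(135deg, #ddd 0%, #74b9ff 50%, #636e72 100%)"
  else if (["snow", "blizzard"].any (fun word => PySem.Str.isIn word condition_lower)) then
    "linear-gradient(135deg, #ffffff 0%, #ddd 50%, #74b9ff 100%)"
  else if (["storm", "thunder"].any (fun word => PySem.Str.isIn word condition_lower)) then
    "linear-gradient(135deg, #2d3436 0%, #636e72 50%, #74b9ff 100%)"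
  else if (["fog", "mist", "haze"].any (fun word => PySem.Str.isIn word condition_lower)) then
    "linear-gradient(135deg, #b2bec3 0%, #ddd 50%, #74b9ff 100%)"
  else
    "linear-gradient(135deg, #74b9ff 0%, #0984e3 100%)"

-- ===== PORT B =====
-- dict with distinct keys, iterated in insertion order → association list
def keywordCategory : List (String × Nat) :=
  [ ("sunny", 0), ("clear", 0), ("bright", 0),
    ("rain", 1), ("shower", 1), ("drizzle", 1),
    ("cloud", 2), ("overcast", 2),
    ("snow", 3), ("blizzard", 3),
    ("storm", 4), ("thunder", 4),
    ("fog", 5), ("mist", 5), ("haze", 5) ]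

def gradients : List String :=
  [ "linear-gradient(135deg, #74b9ff 0%, #0984e3 50%, #fdcb6e 100%)",
    "linear-gradient(135deg, #636e72 0%, #2d3436 50%, #74b9ff 100%)",
    "linear-gradient(135deg, #ddd 0%, #74b9ff 50%, #636e72 100%)",
    "linear-gradient(135deg, #ffffff 0%, #ddd 50%, #74b9ff 100%)",
    "linear-gradient(135deg, #2d3436 0%, #636e72 50%, #74b9ff 100%)",
    "linear-gradient(135deg, #b2bec3 0%, #ddd 50%, #74b9ff 100%)",
    "linear-gradient(135deg, #74b9ff 0%, #0984e3 100%)" ]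

def get_weather_background_alt (condition : String) : String :=
  let s := PySem.Str.lower condition
  -- min((cat for kw, cat in _KEYWORD_CATEGORY.items() if kw in s), default=len(_GRADIENTS)-1)
  let best :=
    match PySem.List.min? ((keywordCategory.filter (fun p => PySem.Str.isIn p.1 s)).map Prod.snd)
        (fun x => x) with
    | some m => m
    | none => gradients.length - 1
  -- _GRADIENTS[best]: best is always a valid index (0..6), so plain indexing is exact
  gradients.getD best ""

-- ===== PRECONDITION & SPEC =====
def Spec_get_weather_background (condition : String) (out : String) : Prop := out = get_weather_background_alt condition
instance (condition : String) (out : String) : Decidable (Spec_get_weather_background condition out) := by unfold Spec_get_weather_background; infer_instance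

-- ===== CLAIM (what is proved, stated in full; the proofs are below) =====
def Claim_equal_get_weather_background : Prop := ∀ (condition : String), Dom_get_weather_background condition → Spec_get_weather_background condition (get_weather_background condition)

-- ===== LEMMAS AND PROOFS =====
-- B computes min over matched categories; since the table is sorted by category, that min is
-- the FIRST match (find?), which is exactly A's ordered ladder.

theorem foldl_min_of_le (t : List Nat) (x : Nat) (h : ∀ y ∈ t, x ≤ y) :
    t.foldl min x = x := by
  induction t with
  | nil => rfl
  | cons a t ih =>
    simp only [List.foldl_cons]
    rw [min_eq_left (h a (by simp))]
    exact ih (fun y hy => h y (by simp [hy]))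

theorem sorted_min?_headD (xs : List Nat) (d : Nat) (h : List.Pairwise (· ≤ ·) xs) :
    (match PySem.List.min? xs (fun x => x) with | some m => m | none => d) = xs.headD d := by
  cases xs with
  | nil => simp [PySem.List.min?]
  | cons x t =>
    rw [PySem.List.min?_id_cons]
    simp only [List.headD_cons]
    exact foldl_min_of_le t x (fun y hy => (List.pairwise_cons.mp h).1 y hy)

theorem filter_headD_eq_find? (l : List (String × Nat)) (q : String × Nat → Bool) (d : Nat) :
    ((l.filter q).map Prod.snd).headD d = ((l.find? q).map Prod.snd).getD d := by
  induction l with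
  | nil => rfl
  | cons a l ih => cases hq : q a <;> simp [hq]

theorem table_sorted : List.Pairwise (· ≤ ·) (keywordCategory.map Prod.snd) := by decide

theorem filtered_sorted (q : String × Nat → Bool) :
    List.Pairwise (· ≤ ·) ((keywordCategory.filter q).map Prod.snd) :=
  List.Pairwise.sublist (List.Sublist.map Prod.snd List.filter_sublist) table_sorted

-- ===== VERDICT (by name: the statement is the Claim_ definition above) =====
theorem get_weather_background_spec : Claim_equal_get_weather_background := by
  intro condition _
  unfold Spec_get_weather_background get_weather_background get_weather_background_alt
  simp only [List.any_cons, List.any_nil, Bool.or_false]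
  rw [sorted_min?_headD _ _ (filtered_sorted _), filter_headD_eq_find?]
  simp only [keywordCategory, List.find?_cons]
  cases PySem.Str.isIn "sunny" (PySem.Str.lower condition) <;> [skip; rfl]
  cases PySem.Str.isIn "clear" (PySem.Str.lower condition) <;> [skip; rfl]
  cases PySem.Str.isIn "bright" (PySem.Str.lower condition) <;> [skip; rfl]
  cases PySem.Str.isIn "rain" (PySem.Str.lower condition) <;> [skip; rfl]
  cases PySem.Str.isIn "shower" (PySem.Str.lower condition) <;> [skip; rfl]
  cases PySem.Str.isIn "drizzle" (PySem.Str.lower condition) <;> [skip; rfl]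
  cases PySem.Str.isIn "cloud" (PySem.Str.lower condition) <;> [skip; rfl]
  cases PySem.Str.isIn "overcast" (PySem.Str.lower condition) <;> [skip; rfl]
  cases PySem.Str.isIn "snow" (PySem.Str.lower condition) <;> [skip; rfl]
  cases PySem.Str.isIn "blizzard" (PySem.Str.lower condition) <;> [skip; rfl]
  cases PySem.Str.isIn "storm" (PySem.Str.lower condition) <;> [skip; rfl]
  cases PySem.Str.isIn "thunder" (PySem.Str.lower condition) <;> [skip; rfl]
  cases PySem.Str.isIn "fog" (PySem.Str.lower condition) <;> [skip; rfl]
  cases PySem.Str.isIn "mist" (PySem.Str.lower condition) <;> [skip; rfl]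
  cases PySem.Str.isIn "haze" (PySem.Str.lower condition) <;> rfl
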